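-- pv_equiv track=rewrite | github.com/duartegroup/unStrain | unstrain.py | get_atoms_in_smiles_string
-- ===== SOURCE A (Python) =====
-- def get_atoms_in_smiles_string(smiles):
--
--     atoms = []
--
--     smiles_str_list = list(smiles)
--     for i, char in enumerate(smiles_str_list):
--         if i < len(smiles_str_list) - 1:
--             if char.isupper() and smiles_str_list[i+1].islower():
--                 atoms.append(''.join(smiles_str_list[i:i+2]))
--             if char.isupper() and not smiles_str_list[i+1].islower():
--                 atoms.append(char)
--         else:
--             if char.isupper():
--                 atoms.append(char)
--
--     return atoms
-- ===== SOURCE B (Python) =====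
-- def get_atoms_in_smiles_string(smiles):
--     atoms = []
--     i, n = 0, len(smiles)
--     while i < n:
--         if smiles[i].isupper() and i + 1 < n and smiles[i + 1].islower():
--             atoms.append(smiles[i:i + 2])
--             i += 2
--         elif smiles[i].isupper():
--             atoms.append(smiles[i])
--             i += 1
--         else:
--             i += 1
--     return atoms
-- ===== Notes on version B (the rewrite author's own statement) =====
-- stated objective: alternative
-- what changed: Replaces A's enumerate pass with per-index lookahead and a separate last-character branch by a single-pass tokenizer over an explicit cursor that consumes two characters for an uppercase+lowercase pair and one otherwise.
import Mathlib
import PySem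

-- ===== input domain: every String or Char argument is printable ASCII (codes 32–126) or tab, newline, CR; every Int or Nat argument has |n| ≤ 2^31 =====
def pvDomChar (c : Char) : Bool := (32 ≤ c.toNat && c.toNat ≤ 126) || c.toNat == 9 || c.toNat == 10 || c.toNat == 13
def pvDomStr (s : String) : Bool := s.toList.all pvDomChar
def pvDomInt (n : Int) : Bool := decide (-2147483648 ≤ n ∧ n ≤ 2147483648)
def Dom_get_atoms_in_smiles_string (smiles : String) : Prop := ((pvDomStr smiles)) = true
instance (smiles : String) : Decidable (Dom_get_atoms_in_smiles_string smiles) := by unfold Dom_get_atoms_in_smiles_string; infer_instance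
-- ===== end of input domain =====

-- B replaces A's per-index enumerate pass (with lookahead and a separate last-character branch)
-- by a cursor tokenizer that consumes two characters for an uppercase+lowercase pair; same cost, alternative decomposition.

-- ===== PORT A =====
-- emission for one enumerate step (the loop body's appends, in source order)
def pvEmitA (sl : List Char) (i : Int) (char : Char) : List String :=
  if i < (sl.length : Int) - 1 then
    (if PySem.Chars.isupper char && PySem.Chars.islower ((PySem.List.pyGet? sl (i + 1)).getD ' ') then
       [String.ofList (PySem.List.slice sl (some i) (some (i + 2)))] else [])
    ++
    (if PySem.Chars.isupper char && !(PySem.Chars.islower ((PySem.List.pyGet? sl (i + 1)).getD ' ')) then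
       [String.ofList [char]] else [])
  else
    (if PySem.Chars.isupper char then [String.ofList [char]] else [])

-- literal port of A: for i, char in enumerate(list(smiles)): ... append ...
-- (sl[i+1] is read with pyGet?; its .getD ' ' default is never used, the branch runs only when i+1 < len;
--  ''.join(sl[i:i+2]) over a char slice is String.ofList of the slice)
def get_atoms_in_smiles_string (smiles : String) : List String :=
  let sl := smiles.toList
  (PySem.List.enumerate sl 0).foldl (fun atoms ic => atoms ++ pvEmitA sl ic.1 ic.2) []

-- ===== PORT B =====
-- literal port of B's cursor loop: consume two chars on an uppercase+lowercase pair, else one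
def pvTokB : List Char → List String
  | [] => []
  | c :: rest =>
    match rest with
    | d :: rest' =>
      if PySem.Chars.isupper c && PySem.Chars.islower d then String.ofList [c, d] :: pvTokB rest'
      else if PySem.Chars.isupper c then String.ofList [c] :: pvTokB (d :: rest')
      else pvTokB (d :: rest')
    | [] => if PySem.Chars.isupper c then [String.ofList [c]] else []

def get_atoms_in_smiles_string_alt (smiles : String) : List String :=
  pvTokB smiles.toList

-- ===== PRECONDITION & SPEC =====
def Spec_get_atoms_in_smiles_string (smiles : String) (out : List String) : Prop := out = get_atoms_in_smiles_string_alt smiles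
instance (smiles : String) (out : List String) : Decidable (Spec_get_atoms_in_smiles_string smiles out) := by unfold Spec_get_atoms_in_smiles_string; infer_instance

-- ===== CLAIM (what is proved, stated in full; the proofs are below) =====
def Claim_equal_get_atoms_in_smiles_string : Prop := ∀ (smiles : String), Dom_get_atoms_in_smiles_string smiles → Spec_get_atoms_in_smiles_string smiles (get_atoms_in_smiles_string smiles)

-- ===== LEMMAS AND PROOFS =====

theorem pv_not_upper_of_lower {c : Char} (h : PySem.Chars.islower c = true) :
    PySem.Chars.isupper c = false := by
  simp only [PySem.Chars.islower, Bool.and_eq_true, decide_eq_true_eq] at h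
  simp only [PySem.Chars.isupper, Bool.and_eq_false_iff, decide_eq_false_iff_not]
  simp only [Char.le_def, UInt32.le_iff_toNat_le, not_le] at h ⊢
  have h1 : ('a' : Char).val.toNat = 97 := by decide
  have h2 : ('Z' : Char).val.toNat = 90 := by decide
  omega

-- invariant: the tail of A's enumerate pass, started at index k, produces B's tokenization of the suffix
theorem pv_main (suf : List Char) : ∀ (k : Nat) (sl : List Char),
    sl.drop k = suf → k + suf.length = sl.length →
    (PySem.List.enumerate suf (k : Int)).flatMap (fun ic => pvEmitA sl ic.1 ic.2) = pvTokB suf := by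
  induction suf with
  | nil => intro k sl _ _; simp [PySem.List.enumerate_nil, pvTokB]
  | cons c suf ih =>
    intro k sl hdrop hlen
    cases suf with
    | nil =>
      have hklen : k + 1 = sl.length := by simpa using hlen
      simp only [PySem.List.enumerate_cons, PySem.List.enumerate_nil, List.flatMap_cons,
        List.flatMap_nil, List.append_nil, pvEmitA, pvTokB]
      rw [if_neg (by omega)]
    | cons d suf' =>
      have hdrop' : sl.drop (k + 1) = d :: suf' := by
        have := congrArg List.tail hdrop
        simpa [List.tail_drop] using this
      have hlen' : (k + 1) + (d :: suf').length = sl.length := by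
        simp at hlen ⊢; omega
      have hgetd : sl[k + 1]? = some d := by
        have := congrArg List.head? hdrop'
        simpa [List.head?_drop] using this
      have hget1 : PySem.List.pyGet? sl ((k : Int) + 1) = some d := by
        have hc1 : ((k : Int) + 1) = ((k + 1 : Nat) : Int) := by push_cast; ring
        rw [hc1, PySem.List.pyGet?_natCast]
        simpa using hgetd
      have hslice : PySem.List.slice sl (some (k : Int)) (some ((k : Int) + 2)) = [c, d] := by
        have h2 : ((k : Int) + 2) = ((k + 2 : Nat) : Int) := by push_cast; ring
        rw [h2, PySem.List.slice_toNat sl (Int.natCast_nonneg k) (Int.natCast_nonneg (k + 2))]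
        simp only [Int.toNat_natCast]
        rw [hdrop]
        have h3 : k + 2 - k = 2 := by omega
        rw [h3]
        rfl
      have ihx := ih (k + 1) sl hdrop' hlen'
      have hc2 : ((k + 1 : Nat) : Int) = (k : Int) + 1 := by push_cast; ring
      rw [hc2] at ihx
      rw [PySem.List.enumerate_cons, List.flatMap_cons, ihx]
      have hlt : (k : Int) < (sl.length : Int) - 1 := by
        simp at hlen'; omega
      simp only [pvEmitA, if_pos hlt, hget1, Option.getD_some, hslice]
      by_cases hu : PySem.Chars.isupper c = true
      · by_cases hl : PySem.Chars.islower d = true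
        · -- A emits a two-char token; B's loop never revisits the consumed lowercase d
          have hnups : PySem.Chars.isupper d = false := pv_not_upper_of_lower hl
          have hcollapse : pvTokB (d :: suf') = pvTokB suf' := by
            cases suf' with
            | nil => simp [pvTokB, hnups]
            | cons e suf'' => simp [pvTokB, hnups]
          rw [hcollapse]
          simp [pvTokB, hu, hl]
        · have hl' : PySem.Chars.islower d = false := by simpa using hl
          simp [pvTokB, hu, hl']
      · have hu' : PySem.Chars.isupper c = false := by simpa using hu
        simp [pvTokB, hu']

theorem pv_ports_agree (smiles : String) :
    get_atoms_in_smiles_string smiles = get_atoms_in_smiles_string_alt smiles := by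
  unfold get_atoms_in_smiles_string get_atoms_in_smiles_string_alt
  rw [PySem.List.foldl_append_eq_flatMap]
  simpa using pv_main smiles.toList 0 smiles.toList (by simp) (by simp)

-- ===== VERDICT (by name: the statement is the Claim_ definition above) =====
theorem get_atoms_in_smiles_string_spec : Claim_equal_get_atoms_in_smiles_string := by
  intro smiles _
  unfold Spec_get_atoms_in_smiles_string
  exact pv_ports_agree smiles
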